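-- pv_equiv track=rewrite | github.com/dylandevotta/Scheduling-Jobs-with-two-servers | Johnsons_rule.py | totaltimeofjobs
-- ===== SOURCE A (Python) =====
-- def totaltimeofjobs(output):
--     totaltime1=0
--     dummy=[]
--     for tuple in output:
--         dummy.append(list(tuple))
--
--
--
--
--     for i in range (0,len(dummy)-1) :
--
--        totaltime1=totaltime1+max(dummy[i+1][0],dummy[i][1])
--
--        if dummy[i][1]>dummy[i+1][0]:
--            if(i+2>len(dummy)-1):
--                break
--            dummy[i+2][0]= dummy[i+2][0]-(dummy[i][1]-dummy[i+1][0])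
--
--
--     totaltime1= totaltime1 + output[0][0] + output[-1][1]
--
--     return output,totaltime1
-- ===== SOURCE B (Python) =====
-- # Closed-form makespan: max over k of (sum of first components through k + sum of
-- # second components from k on), computed as total_b + max_k(prefA(k+1) - prefB(k)),
-- # instead of A's step-by-step schedule simulation with a carried delay.
-- def totaltimeofjobs(output):
--     total_b = sum(b for _, b in output)
--     pa = 0
--     pb = 0
--     m = None
--     for a, b in output:
--         pa += a
--         if m is None or pa - pb > m:
--             m = pa - pb
--         pb += b
--     return output, total_b + m
-- ===== Notes on version B (the rewrite author's own statement) =====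
-- stated objective: alternative
-- what changed: Replaced A's step-by-step two-machine schedule simulation (copied mutable list, carried delay, break) by the closed-form makespan max over k of (prefix sum of first components through k + suffix sum of second components from k), computed in one pass as total_b + max_k(prefA(k+1) - prefB(k)).
import Mathlib
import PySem

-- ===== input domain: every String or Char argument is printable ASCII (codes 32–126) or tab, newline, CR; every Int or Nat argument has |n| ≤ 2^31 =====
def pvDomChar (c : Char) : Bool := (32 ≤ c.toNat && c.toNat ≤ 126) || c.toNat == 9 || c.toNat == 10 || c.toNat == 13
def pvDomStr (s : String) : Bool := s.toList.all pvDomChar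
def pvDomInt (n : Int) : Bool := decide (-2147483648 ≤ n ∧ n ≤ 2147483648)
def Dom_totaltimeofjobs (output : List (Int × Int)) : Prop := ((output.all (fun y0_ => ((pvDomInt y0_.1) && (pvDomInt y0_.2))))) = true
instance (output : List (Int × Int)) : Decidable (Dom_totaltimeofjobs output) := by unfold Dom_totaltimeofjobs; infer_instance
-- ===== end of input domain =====

-- B replaces A's schedule simulation (mutated copy, carried delay) by the closed-form
-- max over k of (prefix sum of first components + suffix sum of second components).
-- A mutates only its private copy `dummy`; the returned list is the argument unchanged.

-- ===== PORT A =====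
-- A's for-loop over range(0, len(dummy)-1) with in-place mutation of dummy and a break;
-- indexing is in range for every index A actually reads (getD's default is never used on Pre_ inputs).
def totaltimeofjobs_loopA : List Nat → List (Int × Int) → Int → (List (Int × Int)) × Int
  | [], dummy, t => (dummy, t)
  | i :: rest, dummy, t =>
    let t' := t + max (dummy.getD (i+1) (0,0)).1 (dummy.getD i (0,0)).2
    if (dummy.getD i (0,0)).2 > (dummy.getD (i+1) (0,0)).1 then
      if (i : Int) + 2 > (dummy.length : Int) - 1 then (dummy, t')   -- break
      else
        totaltimeofjobs_loopA rest
          (dummy.modify (i+2) (fun p => (p.1 - ((dummy.getD i (0,0)).2 - (dummy.getD (i+1) (0,0)).1), p.2))) t'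
    else totaltimeofjobs_loopA rest dummy t'

def totaltimeofjobs (output : List (Int × Int)) : (List (Int × Int)) × Int :=
  -- dummy = [list(t) for t in output]  (a pair of ints, modelled as Int × Int)
  let dummy := output
  let r := totaltimeofjobs_loopA (List.range (dummy.length - 1)) dummy 0
  -- output[0][0] and output[-1][1] raise IndexError on []; Pre_ excludes the empty list
  let t := r.2 + ((PySem.List.pyGet? output 0).getD (0,0)).1
              + ((PySem.List.pyGet? output (-1)).getD (0,0)).2
  (output, t)

-- ===== PORT B =====
-- Source B: total_b = sum of second components; one pass keeping (pa, pb, m) where m is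
-- the running maximum of pa - pb taken just after adding a and before adding b.
def totaltimeofjobs_altStep (st : Int × Int × Option Int) (p : Int × Int) : Int × Int × Option Int :=
  let pa := st.1 + p.1
  let m : Option Int :=
    match st.2.2 with
    | none => some (pa - st.2.1)
    | some m0 => if pa - st.2.1 > m0 then some (pa - st.2.1) else some m0
  (pa, st.2.1 + p.2, m)

def totaltimeofjobs_alt (output : List (Int × Int)) : (List (Int × Int)) × Int :=
  let total_b := (output.map Prod.snd).sum
  let st := output.foldl totaltimeofjobs_altStep (0, 0, none)
  -- total_b + m raises TypeError on [] (m is None); Pre_ excludes the empty list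
  (output, total_b + st.2.2.getD 0)

-- ===== PRECONDITION & SPEC =====
-- Pre_ excludes only the empty list, on which A raises IndexError (output[0][0]) and B raises TypeError.
def Pre_totaltimeofjobs (output : List (Int × Int)) : Prop := output ≠ []
instance (output : List (Int × Int)) : Decidable (Pre_totaltimeofjobs output) := by unfold Pre_totaltimeofjobs; infer_instance
def pvWitness_totaltimeofjobs : (List (Int × Int)) := [(2, 3), (1, 4)]

def Spec_totaltimeofjobs (output : List (Int × Int)) (out : (List (Int × Int)) × Int) : Prop := out = totaltimeofjobs_alt output
instance (output : List (Int × Int)) (out : (List (Int × Int)) × Int) : Decidable (Spec_totaltimeofjobs output out) := by unfold Spec_totaltimeofjobs; infer_instance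

-- ===== CLAIM (what is proved, stated in full; the proofs are below) =====
def Claim_equal_totaltimeofjobs : Prop := ∀ (output : List (Int × Int)), Dom_totaltimeofjobs output → Pre_totaltimeofjobs output → Spec_totaltimeofjobs output (totaltimeofjobs output)

-- ===== LEMMAS AND PROOFS =====

-- B's carry-style step, an intermediate between A's loop and the closed form
def stepB (output : List (Int × Int)) (n : Nat) (acc : Int × Int) (i : Nat) : Int × Int :=
  let f := (output.getD (i+1) (0,0)).1 - acc.2
  let s := (output.getD i (0,0)).2
  (acc.1 + max f s, if s > f ∧ (i : Int) + 2 ≤ (n : Int) - 1 then s - f else 0)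

-- prefix sums of first / second components, suffix sums of second components
def Pa (output : List (Int × Int)) (k : Nat) : Int := ((output.take k).map Prod.fst).sum
def Pb (output : List (Int × Int)) (k : Nat) : Int := ((output.take k).map Prod.snd).sum
def Sb (output : List (Int × Int)) (k : Nat) : Int := ((output.drop k).map Prod.snd).sum

-- the "running maximum machine-2 availability" recursion extracted from A's loop
def Gf (output : List (Int × Int)) : Nat → Nat → Int → Int
  | _, 0, M => M
  | s, k+1, M => Gf output (s+1) k (max (Pa output (s+2)) (M + (output.getD s (0,0)).2))

-- B's running maximum (of pa - pb) and its suffix-sum counterpart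
def m2 (output : List (Int × Int)) : Nat → Int
  | 0 => Pa output 1 - Pb output 0
  | j+1 => max (m2 output j) (Pa output (j+2) - Pb output (j+1))

def mrec (output : List (Int × Int)) : Nat → Int
  | 0 => Pa output 1 + Sb output 0
  | j+1 => max (mrec output j) (Pa output (j+2) + Sb output (j+1))

theorem Pa_succ (output : List (Int × Int)) (j : Nat) (h : j < output.length) :
    Pa output (j+1) = Pa output j + (output.getD j (0,0)).1 := by
  rw [Pa, Pa, List.take_add_one, List.map_append, List.sum_append]
  simp [List.getElem?_eq_getElem h, List.getD]

theorem Pb_succ (output : List (Int × Int)) (j : Nat) (h : j < output.length) :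
    Pb output (j+1) = Pb output j + (output.getD j (0,0)).2 := by
  rw [Pb, Pb, List.take_add_one, List.map_append, List.sum_append]
  simp [List.getElem?_eq_getElem h, List.getD]

theorem Sb_succ (output : List (Int × Int)) (j : Nat) (h : j < output.length) :
    Sb output j = (output.getD j (0,0)).2 + Sb output (j+1) := by
  rw [Sb, List.drop_eq_getElem_cons h, List.map_cons, List.sum_cons, Sb]
  simp [List.getD, List.getElem?_eq_getElem h]

theorem Pb_Sb (output : List (Int × Int)) (k : Nat) :
    Pb output k + Sb output k = (output.map Prod.snd).sum := by
  rw [Pb, Sb, ← List.sum_append, ← List.map_append, List.take_append_drop]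

theorem mrec_m2 (output : List (Int × Int)) : ∀ j, mrec output j = (output.map Prod.snd).sum + m2 output j := by
  intro j
  induction j with
  | zero =>
    have := Pb_Sb output 0
    simp [mrec, m2, Pb, Sb] at *
    omega
  | succ j ih =>
    have h := Pb_Sb output (j+1)
    simp only [mrec, m2, ih]
    have : Pa output (j+2) + Sb output (j+1) = (output.map Prod.snd).sum + (Pa output (j+2) - Pb output (j+1)) := by omega
    rw [this, ← max_add_add_left]

-- A's loop equals the carry-style fold (invariant: dummy is output with the pending
-- reduction subtracted from the next first component)
theorem loop_eq (k : Nat) : ∀ (s : Nat) (output dummy : List (Int × Int)) (t c : Int),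
    s + k + 1 = output.length →
    dummy.length = output.length →
    (∀ j, (dummy.getD j (0,0)).2 = (output.getD j (0,0)).2) →
    (dummy.getD (s+1) (0,0)).1 = (output.getD (s+1) (0,0)).1 - c →
    (∀ j, s + 2 ≤ j → (dummy.getD j (0,0)).1 = (output.getD j (0,0)).1) →
    (totaltimeofjobs_loopA (List.range' s k) dummy t).2 =
      ((List.range' s k).foldl (stepB output output.length) (t, c)).1 := by
  induction k with
  | zero => intro s output dummy t c _ _ _ _ _; rfl
  | succ k ih =>
    intro s output dummy t c hn hlen h2 hcarry hrest
    rw [List.range'_succ]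
    simp only [totaltimeofjobs_loopA, List.foldl_cons]
    rw [hlen, h2 s, hcarry]
    set f := (output.getD (s+1) (0,0)).1 - c with hf
    set sv := (output.getD s (0,0)).2 with hsv
    have hstep : stepB output output.length (t, c) s =
        (t + max f sv, if sv > f ∧ (s : Int) + 2 ≤ (output.length : Int) - 1 then sv - f else 0) := rfl
    rw [hstep]
    by_cases hgt : sv > f
    · rw [if_pos hgt]
      by_cases hbr : (s : Int) + 2 > (output.length : Int) - 1
      · have hk0 : k = 0 := by omega
        subst hk0
        rw [if_pos hbr]
        simp only [List.range'_zero, List.foldl_nil]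
      · rw [if_neg hbr, if_pos ⟨hgt, by omega⟩]
        have hlt : s + 2 < dummy.length := by omega
        have hout : s + 2 < output.length := by omega
        refine ih (s+1) output _ _ (sv - f) (by omega) (by simp [List.length_modify]; omega) ?_ ?_ ?_
        · intro j
          rcases Nat.lt_or_ge j dummy.length with hj | hj
          · have hjo : j < output.length := by omega
            have := h2 j
            simp only [List.getD, List.getElem?_modify, List.getElem?_eq_getElem hj,
              List.getElem?_eq_getElem hjo, Option.getD_some] at this ⊢
            split <;> simp [this]
          · rw [List.getD, List.getElem?_eq_none (by simp [List.length_modify]; omega),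
              List.getD, List.getElem?_eq_none (by omega)]
        · have := hrest (s+2) (le_refl _)
          simp only [List.getD, List.getElem?_modify,
            List.getElem?_eq_getElem hlt, List.getElem?_eq_getElem hout,
            Option.getD_some] at this ⊢
          try simp only [Nat.add_comm 2 s] at this ⊢
          simp [this]
        · intro j hj
          rcases Nat.lt_or_ge j dummy.length with hjl | hjl
          · have hne : ¬ (s + 2 = j) := by omega
            have := hrest j (by omega)
            simp only [List.getD, List.getElem?_modify, hne, if_false,
              List.getElem?_eq_getElem hjl,
              List.getElem?_eq_getElem (by omega : j < output.length)] at this ⊢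
            simpa using this
          · rw [List.getD, List.getElem?_eq_none (by simp [List.length_modify]; omega),
              List.getD, List.getElem?_eq_none (by omega)]
    · rw [if_neg hgt, if_neg (fun h => hgt h.1)]
      refine ih (s+1) output dummy _ 0 (by omega) hlen h2 ?_ (fun j hj => hrest j (by omega))
      rw [hrest (s+2) (le_refl _)]
      ring

-- the carry fold computes Gf
theorem fold_carry_G (output : List (Int × Int)) : ∀ (k s : Nat) (T c : Int),
    s + k = output.length - 1 → 1 ≤ output.length →
    ((List.range' s k).foldl (stepB output output.length) (T, c)).1
      = T - (c + Pa output (s+1)) + Gf output s k (c + Pa output (s+1)) := by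
  intro k
  induction k with
  | zero => intro s T c _ _; simp [Gf]
  | succ k ih =>
    intro s T c hk hn
    have hs1 : s + 1 < output.length := by omega
    have hPa : Pa output (s+2) = Pa output (s+1) + (output.getD (s+1) (0,0)).1 :=
      Pa_succ output (s+1) hs1
    rw [List.range'_succ, List.foldl_cons]
    set a := (output.getD (s+1) (0,0)).1 with ha
    set b := (output.getD s (0,0)).2 with hb
    have hstep : stepB output output.length (T, c) s =
        (T + max (a - c) b, if b > a - c ∧ (s : Int) + 2 ≤ (output.length : Int) - 1 then b - (a - c) else 0) := rfl
    rw [hstep]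
    simp only [Gf]
    rcases Nat.eq_zero_or_pos k with hk0 | hkpos
    · subst hk0
      have hcond : ¬ ((s : Int) + 2 ≤ (output.length : Int) - 1) := by omega
      rw [if_neg (fun h => hcond h.2)]
      simp only [List.range'_zero, List.foldl_nil, Gf]
      have : max (Pa output (s+2)) (c + Pa output (s+1) + b)
          = max (a - c) b + (c + Pa output (s+1)) := by
        rw [hPa, ← max_add_add_right]; ring_nf
      rw [this]; ring
    · have hcond : (s : Int) + 2 ≤ (output.length : Int) - 1 := by omega
      have hM' : (if b > a - c ∧ (s : Int) + 2 ≤ (output.length : Int) - 1 then b - (a - c) else 0)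
            + Pa output (s+1+1)
          = max (Pa output (s+2)) (c + Pa output (s+1) + b) := by
        rw [hPa]
        split_ifs with h
        · rw [max_eq_right (by omega)]; ring
        · rw [max_eq_left (by omega)]; ring
      rw [ih (s+1) _ _ (by omega) hn, hM']
      have : max (Pa output (s+2)) (c + Pa output (s+1) + b)
          = max (a - c) b + (c + Pa output (s+1)) := by
        rw [hPa, ← max_add_add_right]; ring_nf
      rw [this]; ring

-- adding the last second component turns Gf into a fold of maxima of prefix+suffix sums
theorem G_shift (output : List (Int × Int)) : ∀ (k s : Nat) (M : Int),
    s + k = output.length - 1 → 1 ≤ output.length →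
    Gf output s k M + (output.getD (output.length - 1) (0,0)).2
      = (List.range' (s+1) k).foldl (fun m t => max m (Pa output (t+1) + Sb output t)) (M + Sb output s) := by
  intro k
  induction k with
  | zero =>
    intro s M hk hn
    have hs : s < output.length := by omega
    have : s = output.length - 1 := by omega
    subst this
    rw [Gf]
    simp only [List.range'_zero, List.foldl_nil]
    rw [Sb_succ output _ hs]
    have : Sb output (output.length - 1 + 1) = 0 := by
      have : output.length - 1 + 1 = output.length := by omega
      rw [this, Sb]; simp
    rw [this]; ring
  | succ k ih =>
    intro s M hk hn
    have hs : s < output.length := by omega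
    rw [Gf, ih (s+1) _ (by omega) hn, List.range'_succ, List.foldl_cons]
    congr 1
    rw [← max_add_add_right, Sb_succ output s hs, max_comm]
    ring_nf

theorem fold_max_mrec (output : List (Int × Int)) : ∀ (k j : Nat),
    (List.range' (j+1) k).foldl (fun m t => max m (Pa output (t+1) + Sb output t)) (mrec output j)
      = mrec output (j + k) := by
  intro k
  induction k with
  | zero => intro j; simp
  | succ k ih =>
    intro j
    rw [List.range'_succ, List.foldl_cons]
    have : max (mrec output j) (Pa output (j+1+1) + Sb output (j+1)) = mrec output (j+1) := rfl
    rw [this, ih (j+1)]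
    congr 1
    omega

-- B's main fold maintains (Pa j, Pb j, some (m2 (j-1)))
theorem B_fold (output : List (Int × Int)) : ∀ (k j : Nat), 1 ≤ j → j + k = output.length →
    (output.drop j).foldl totaltimeofjobs_altStep
      (Pa output j, Pb output j, some (m2 output (j-1)))
      = (Pa output output.length, Pb output output.length, some (m2 output (output.length - 1))) := by
  intro k
  induction k with
  | zero =>
    intro j _ hj
    have hjl : j = output.length := by omega
    subst hjl
    simp
  | succ k ih =>
    intro j hj1 hjk
    have hj : j < output.length := by omega
    rw [List.drop_eq_getElem_cons hj, List.foldl_cons]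
    unfold totaltimeofjobs_altStep
    have hgetD : output.getD j (0,0) = output[j] := by
      simp [List.getD, List.getElem?_eq_getElem hj]
    have hpa : Pa output j + output[j].1 = Pa output (j+1) := by
      rw [Pa_succ output j hj, hgetD]
    have hpb : Pb output j + output[j].2 = Pb output (j+1) := by
      rw [Pb_succ output j hj, hgetD]
    have hm : (if Pa output (j+1) - Pb output j > m2 output (j-1)
          then some (Pa output (j+1) - Pb output j)
          else some (m2 output (j-1))) = some (m2 output j) := by
      obtain ⟨j', rfl⟩ : ∃ j', j = j' + 1 := ⟨j - 1, by omega⟩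
      have hm2 : m2 output (j'+1) = max (m2 output j') (Pa output (j'+2) - Pb output (j'+1)) := rfl
      simp only [Nat.add_sub_cancel, hm2, show j' + 1 + 1 = j' + 2 by omega]
      split_ifs with h
      · rw [max_eq_right (by omega)]
      · rw [max_eq_left (by omega)]
    simp only []
    rw [hpa, hpb, hm]
    have := ih (j+1) (by omega) (by omega)
    simpa using this

-- ===== VERDICT (by name: the statement is the Claim_ definition above) =====
theorem totaltimeofjobs_spec : Claim_equal_totaltimeofjobs := by
  intro output _ hpre
  obtain ⟨p, rest, rfl⟩ : ∃ p rest, output = p :: rest := by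
    cases output with
    | nil => exact absurd rfl hpre
    | cons a l => exact ⟨a, l, rfl⟩
  unfold Spec_totaltimeofjobs totaltimeofjobs totaltimeofjobs_alt
  simp only [List.range_eq_range']
  have hn : 1 ≤ (p :: rest).length := by simp
  have hA := loop_eq ((p::rest).length - 1) 0 (p::rest) (p::rest) 0 0 (by simp) rfl
    (fun _ => rfl) (by ring) (fun _ _ => rfl)
  have hcarry := fold_carry_G (p::rest) ((p::rest).length - 1) 0 0 0 (by omega) hn
  have hGs := G_shift (p::rest) ((p::rest).length - 1) 0 (Pa (p::rest) 1) (by omega) hn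
  have hmr := fold_max_mrec (p::rest) ((p::rest).length - 1) 0
  have hm2 := mrec_m2 (p::rest) ((p::rest).length - 1)
  have hB := B_fold (p::rest) ((p::rest).length - 1) 1 (by omega)
    (by simp only [List.length_cons]; omega)
  simp only [zero_add, zero_sub] at hcarry hGs hmr
  have hp1 : Pa (p::rest) 1 = p.1 := by simp [Pa]
  have hg0 : ((PySem.List.pyGet? (p::rest) 0).getD (0,0)).1 = p.1 := by
    rw [PySem.List.pyGet?_zero_cons]; rfl
  have hgl : ((PySem.List.pyGet? (p::rest) (-1)).getD (0,0)).2
      = ((p::rest).getD ((p::rest).length - 1) (0,0)).2 := by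
    rw [PySem.List.pyGet?_neg_one, List.getLast?_eq_getElem?, List.getD]
  have hstep1 : totaltimeofjobs_altStep (0, 0, none) p
      = (Pa (p::rest) 1, Pb (p::rest) 1, some (m2 (p::rest) 0)) := by
    simp [totaltimeofjobs_altStep, Pa, Pb, m2]
  have hB' : (p :: rest).foldl totaltimeofjobs_altStep (0, 0, none)
      = (Pa (p::rest) (p::rest).length, Pb (p::rest) (p::rest).length,
          some (m2 (p::rest) ((p::rest).length - 1))) := by
    rw [List.foldl_cons, hstep1]
    simpa using hB
  have hmrec0 : mrec (p::rest) 0 = Pa (p::rest) 1 + Sb (p::rest) 0 := rfl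
  refine Prod.ext rfl ?_
  show (totaltimeofjobs_loopA (List.range' 0 ((p :: rest).length - 1)) (p :: rest) 0).2
      + ((PySem.List.pyGet? (p::rest) 0).getD (0,0)).1
      + ((PySem.List.pyGet? (p::rest) (-1)).getD (0,0)).2
    = ((p::rest).map Prod.snd).sum
      + ((p :: rest).foldl totaltimeofjobs_altStep (0, 0, none)).2.2.getD 0
  rw [hA, hcarry, hg0, hgl, hB']
  simp only [Option.getD_some]
  rw [hmrec0] at hmr
  omega
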